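-- pv_equiv track=rewrite | github.com/MasterOfMastersDestoyerOfWorlds/Blender-Procedural-Human | procedural_human/utils/tree_sitter_utils.py | _compact_blank_lines
-- ===== SOURCE A (Python) =====
-- from typing import Optional, Dict, List, Tuple, Any
--
-- def _compact_blank_lines(lines: List[str], max_consecutive: int = 2) -> List[str]:
--     """
--     Compact consecutive blank lines to at most max_consecutive.
--
--     This prevents blank line accumulation when repeatedly removing and re-adding content.
--     """
--     result = []
--     blank_count = 0
--
--     for line in lines:
--         if line.strip() == "":
--             blank_count += 1
--             if blank_count <= max_consecutive:
--                 result.append(line)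
--         else:
--             blank_count = 0
--             result.append(line)
--
--     # Also trim trailing blank lines
--     while result and result[-1].strip() == "":
--         result.pop()
--
--     return result
-- ===== SOURCE B (Python) =====
-- from itertools import groupby
-- from typing import List
--
-- def _compact_blank_lines(lines: List[str], max_consecutive: int = 2) -> List[str]:
--     """Compact runs of blank lines via groupby, then trim trailing blanks."""
--     keep = max(0, max_consecutive)
--     result = []
--     for is_blank, run in groupby(lines, key=lambda l: l.strip() == ""):
--         run = list(run)
--         result.extend(run[:keep] if is_blank else run)
--     while result and result[-1].strip() == "":
--         result.pop()
--     return result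
-- ===== Notes on version B (the rewrite author's own statement) =====
-- stated objective: idiomatic
-- what changed: Replaces the per-line blank_count state machine with itertools.groupby over maximal blank/non-blank runs, keeping only the first max(0, max_consecutive) lines of each blank run, then the same trailing trim.
import Mathlib
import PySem

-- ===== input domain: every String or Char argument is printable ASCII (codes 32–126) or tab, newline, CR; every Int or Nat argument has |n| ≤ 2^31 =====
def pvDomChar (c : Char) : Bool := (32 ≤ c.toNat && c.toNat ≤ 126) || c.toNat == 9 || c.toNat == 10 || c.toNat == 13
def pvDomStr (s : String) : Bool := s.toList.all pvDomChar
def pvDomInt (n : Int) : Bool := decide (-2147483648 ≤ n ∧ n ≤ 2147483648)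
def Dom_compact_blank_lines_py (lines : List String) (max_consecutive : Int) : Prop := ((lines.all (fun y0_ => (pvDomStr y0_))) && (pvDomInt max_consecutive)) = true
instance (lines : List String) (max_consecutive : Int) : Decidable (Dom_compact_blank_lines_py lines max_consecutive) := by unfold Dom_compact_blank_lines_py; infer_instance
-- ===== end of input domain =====

-- B replaces A's per-line blank_count state machine by grouping maximal blank/non-blank
-- runs and keeping only the first max(0, max_consecutive) lines of each blank run (idiomatic).

-- line.strip() == ""
def pvIsBlank (s : String) : Bool := PySem.Str.strip s == ""

-- 'while result and result[-1].strip() == "": result.pop()'  (shared literal trim loop of both Pythons)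
def pvPopTrailing (res : List String) : List String :=
  match h : res.getLast? with
  | some l => if pvIsBlank l then pvPopTrailing res.dropLast else res
  | none => res
termination_by res.length
decreasing_by
  cases res with
  | nil => simp at h
  | cons a as => simp [List.length_dropLast]

-- ===== PORT A =====
def compact_blank_lines_py (lines : List String) (max_consecutive : Int) : List String :=
  let fin := lines.foldl
    (fun (p : List String × Int) line =>
      if pvIsBlank line then
        let c := p.2 + 1
        (if c ≤ max_consecutive then p.1 ++ [line] else p.1, c)
      else
        (p.1 ++ [line], 0))
    ([], 0)
  pvPopTrailing fin.1

-- ===== PORT B =====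
-- itertools.groupby(lines, key=lambda l: l.strip()=="") as (key, run) pairs
def pvGroupRuns (lines : List String) : List (Bool × List String) :=
  match lines with
  | [] => []
  | l :: ls =>
    let b := pvIsBlank l
    (b, l :: ls.takeWhile (fun s => pvIsBlank s == b))
      :: pvGroupRuns (ls.dropWhile (fun s => pvIsBlank s == b))
termination_by lines.length
decreasing_by
  have := List.length_dropWhile_le (fun s => pvIsBlank s == b) ls
  simp; omega

def compact_blank_lines_py_alt (lines : List String) (max_consecutive : Int) : List String :=
  let keep := max 0 max_consecutive
  let result := (pvGroupRuns lines).foldl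
    (fun res (p : Bool × List String) =>
      res ++ (if p.1 then p.2.take keep.toNat else p.2)) []
  pvPopTrailing result

-- ===== PRECONDITION & SPEC =====
def Spec_compact_blank_lines_py (lines : List String) (max_consecutive : Int) (out : List String) : Prop := out = compact_blank_lines_py_alt lines max_consecutive
instance (lines : List String) (max_consecutive : Int) (out : List String) : Decidable (Spec_compact_blank_lines_py lines max_consecutive out) := by unfold Spec_compact_blank_lines_py; infer_instance

-- ===== CLAIM (what is proved, stated in full; the proofs are below) =====
def Claim_equal_compact_blank_lines_py : Prop := ∀ (lines : List String) (max_consecutive : Int), Dom_compact_blank_lines_py lines max_consecutive → Spec_compact_blank_lines_py lines max_consecutive (compact_blank_lines_py lines max_consecutive)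

-- ===== LEMMAS AND PROOFS =====

-- reference shape of the compacted (pre-trim) list, with current blank count c
def pvRef (m : Int) : List String → Int → List String
  | [], _ => []
  | l :: ls, c =>
    if pvIsBlank l then
      if c + 1 ≤ m then l :: pvRef m ls (c + 1) else pvRef m ls (c + 1)
    else l :: pvRef m ls 0

theorem pvFoldA (m : Int) (ls : List String) (res : List String) (c : Int) :
    (ls.foldl
      (fun (p : List String × Int) line =>
        if pvIsBlank line then
          let c := p.2 + 1
          (if c ≤ m then p.1 ++ [line] else p.1, c)
        else
          (p.1 ++ [line], 0)) (res, c)).1 = res ++ pvRef m ls c := by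
  induction ls generalizing res c with
  | nil => simp [pvRef]
  | cons l ls ih =>
    by_cases hb : pvIsBlank l
    · by_cases hc : c + 1 ≤ m
      · simp only [List.foldl_cons, hb, if_true, if_pos hc]
        rw [ih]; simp [pvRef, hb, hc]
      · simp only [List.foldl_cons, hb, if_true, if_neg hc]
        rw [ih]; simp [pvRef, hb, hc]
    · simp only [List.foldl_cons, hb, Bool.false_eq_true, if_false]
      rw [ih]; simp [pvRef, hb]

theorem pvRef_zero_of_head_nonblank (m : Int) (rest : List String) (c : Int)
    (h : ∀ x, rest.head? = some x → pvIsBlank x = false) :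
    pvRef m rest c = pvRef m rest 0 := by
  cases rest with
  | nil => rfl
  | cons x xs => simp [pvRef, h x rfl]

theorem pvRef_nonblank (m : Int) (ns rest : List String)
    (h : ∀ s ∈ ns, pvIsBlank s = false) :
    pvRef m (ns ++ rest) 0 = ns ++ pvRef m rest 0 := by
  induction ns with
  | nil => rfl
  | cons x xs ih =>
    have hx : pvIsBlank x = false := h x (by simp)
    simp [pvRef, hx, ih (fun s hs => h s (by simp [hs]))]

theorem pvRef_blank (m : Int) (bs rest : List String) (c : Int)
    (h : ∀ s ∈ bs, pvIsBlank s = true) :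
    pvRef m (bs ++ rest) c = bs.take (m - c).toNat ++ pvRef m rest (c + bs.length) := by
  induction bs generalizing c with
  | nil => simp
  | cons x xs ih =>
    have hx : pvIsBlank x = true := h x (by simp)
    have ih' := ih (c + 1) (fun s hs => h s (by simp [hs]))
    have harg : pvRef m rest ((c + 1) + (xs.length : Int))
        = pvRef m rest (c + ((x :: xs).length : Int)) := by
      congr 1; push_cast [List.length_cons]; ring
    by_cases hc : c + 1 ≤ m
    · have ht : (m - c).toNat = (m - (c + 1)).toNat + 1 := by omega
      calc pvRef m ((x :: xs) ++ rest) c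
          = x :: pvRef m (xs ++ rest) (c + 1) := by simp [pvRef, hx, hc]
        _ = x :: (xs.take ((m - (c + 1)).toNat) ++ pvRef m rest ((c + 1) + xs.length)) := by
              rw [ih']
        _ = (x :: xs).take ((m - c).toNat) ++ pvRef m rest (c + (x :: xs).length) := by
              rw [ht, List.take_succ_cons, harg]; simp
    · have h0 : (m - c).toNat = 0 := by omega
      have h1 : (m - (c + 1)).toNat = 0 := by omega
      calc pvRef m ((x :: xs) ++ rest) c
          = pvRef m (xs ++ rest) (c + 1) := by simp [pvRef, hx, hc]
        _ = xs.take ((m - (c + 1)).toNat) ++ pvRef m rest ((c + 1) + xs.length) := ih'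
        _ = (x :: xs).take ((m - c).toNat) ++ pvRef m rest (c + (x :: xs).length) := by
              rw [h0, h1, harg]; simp

theorem pvFlatMapGroup (m : Int) (lines : List String) :
    (pvGroupRuns lines).flatMap
      (fun p => if p.1 then p.2.take (max 0 m).toNat else p.2) = pvRef m lines 0 := by
  induction lines using pvGroupRuns.induct with
  | case1 => simp [pvGroupRuns, pvRef]
  | case2 l ls b ih =>
    rw [pvGroupRuns]
    simp only [List.flatMap_cons]
    have hbdef : b = pvIsBlank l := rfl
    clear_value b
    have hsplit : ls = ls.takeWhile (fun s => pvIsBlank s == b) ++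
        ls.dropWhile (fun s => pvIsBlank s == b) := (List.takeWhile_append_dropWhile).symm
    have hrun : ∀ s ∈ ls.takeWhile (fun s => pvIsBlank s == b), pvIsBlank s = b := by
      intro s hs
      have := List.mem_takeWhile_imp hs
      simpa using this
    have hhead : ∀ x, (ls.dropWhile (fun s => pvIsBlank s == b)).head? = some x →
        ¬ pvIsBlank x = b := by
      intro x hx
      have h2 := List.head?_dropWhile_not (fun s => pvIsBlank s == b) ls
      rw [hx] at h2
      simpa using h2
    by_cases hb : pvIsBlank l
    · -- blank run
      have hb' : b = true := by rw [hbdef, hb]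
      subst hb'
      have hall : ∀ s ∈ l :: ls.takeWhile (fun s => pvIsBlank s == true), pvIsBlank s = true := by
        intro s hs; rcases List.mem_cons.mp hs with h | h
        · subst h; exact hb
        · exact hrun s h
      conv_rhs => rw [show (l :: ls) = (l :: ls.takeWhile (fun s => pvIsBlank s == true)) ++
          ls.dropWhile (fun s => pvIsBlank s == true) from by rw [List.cons_append, ← hsplit]]
      rw [pvRef_blank m _ _ 0 hall]
      rw [pvRef_zero_of_head_nonblank m _ _
        (fun x hx => by simpa using hhead x hx)]
      have hmax : (max 0 m).toNat = (m - 0).toNat := by omega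
      simp only [hmax] at ih ⊢
      simp [hb]
      simpa using ih
    · -- non-blank run
      have hb' : b = false := by rw [hbdef]; simp [hb]
      subst hb'
      have hall : ∀ s ∈ l :: ls.takeWhile (fun s => pvIsBlank s == false), pvIsBlank s = false := by
        intro s hs; rcases List.mem_cons.mp hs with h | h
        · subst h; simpa using hb
        · exact hrun s h
      conv_rhs => rw [show (l :: ls) = (l :: ls.takeWhile (fun s => pvIsBlank s == false)) ++
          ls.dropWhile (fun s => pvIsBlank s == false) from by rw [List.cons_append, ← hsplit]]
      rw [pvRef_nonblank m _ _ hall]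
      simp [hb]
      simpa using ih

-- ===== VERDICT (by name: the statement is the Claim_ definition above) =====
theorem compact_blank_lines_py_spec : Claim_equal_compact_blank_lines_py := by
  intro lines m _
  unfold Spec_compact_blank_lines_py compact_blank_lines_py compact_blank_lines_py_alt
  dsimp only
  rw [pvFoldA m lines [] 0]
  rw [PySem.List.foldl_append_eq_flatMap]
  rw [pvFlatMapGroup m lines]
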